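-- pv_equiv track=rewrite | github.com/boris-pavel/X-mas-Tree | X-mas Tree/task/xmasstree.py | trim_decorations
-- ===== SOURCE A (Python) =====
-- def trim_decorations(tree, interval):
--     lst = list(tree)
--     counter = 0
--
--     # checks for 'O' and replaces them with leaves if not part of the interval
--     for i in range(0, len(tree)):
--         if lst[i] == 'O':
--             counter += 1
--         if counter % interval != 1 and lst[i] == 'O' and interval != 1:
--             lst[i] = '*'
--
--     return ''.join(lst)
-- ===== SOURCE B (Python) =====
-- def trim_decorations(tree, interval):
--     # Split on the ornaments: the j-th separator (1-based) is the j-th 'O'.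
--     parts = tree.split('O')
--     pieces = [parts[0]]
--     for j, part in enumerate(parts[1:], start=1):
--         pieces.append('O' if interval == 1 or j % interval == 1 else '*')
--         pieces.append(part)
--     return ''.join(pieces)
-- ===== Notes on version B (the rewrite author's own statement) =====
-- stated objective: faster
-- what changed: B splits the string on 'O' and rejoins the ornament-free segments with computed separators (the j-th separator stays 'O' iff interval==1 or j % interval == 1), instead of A's per-character Python loop that counts ornaments and mutates a list in place; the per-character work moves into C-level str.split/join.
import Mathlib
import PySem

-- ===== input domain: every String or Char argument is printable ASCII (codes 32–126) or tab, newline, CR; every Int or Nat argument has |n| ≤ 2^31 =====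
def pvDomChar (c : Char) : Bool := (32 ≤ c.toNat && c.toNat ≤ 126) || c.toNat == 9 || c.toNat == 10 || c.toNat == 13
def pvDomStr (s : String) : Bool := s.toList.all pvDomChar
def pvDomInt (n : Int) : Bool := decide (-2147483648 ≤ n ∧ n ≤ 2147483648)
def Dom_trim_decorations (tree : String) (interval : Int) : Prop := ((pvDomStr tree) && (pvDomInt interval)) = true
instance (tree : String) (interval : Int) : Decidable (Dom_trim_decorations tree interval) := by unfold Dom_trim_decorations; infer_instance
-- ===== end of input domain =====

-- B splits the string on 'O' and rejoins the segments with computed separators instead of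
-- A's per-character counting loop with in-place replacement (objective: alternative).


-- ===== PORT A =====
-- A's single loop: each step updates the counter, then possibly replaces lst[i] in place;
-- since iteration i only reads/writes lst[i], the loop is the obvious structural recursion.
def pvLoopA (cs : List Char) (counter : Int) (interval : Int) : List Char :=
  match cs with
  | [] => []
  | c :: rest =>
    let counter' := if c = 'O' then counter + 1 else counter
    let c' := if PySem.Int.mod counter' interval ≠ 1 ∧ c = 'O' ∧ interval ≠ 1 then '*' else c
    c' :: pvLoopA rest counter' interval

def trim_decorations (tree : String) (interval : Int) : String :=
  String.mk (pvLoopA tree.toList 0 interval)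

-- ===== PORT B =====
-- Source B: parts = tree.split('O') (ported as Mathlib's List.splitOn, the corresponding library
-- function: exact for a one-character separator); then a loop over enumerate(parts[1:], start=1)
-- appending the computed separator and the segment; ''.join = concatenation.
def trim_decorations_alt (tree : String) (interval : Int) : String :=
  let parts := List.splitOn 'O' tree.toList
  let pieces := ((parts.drop 1).zipIdx 1).foldl
    (fun acc pj =>
      acc ++ [[if interval = 1 ∨ PySem.Int.mod (pj.2 : Int) interval = 1 then 'O' else '*'], pj.1])
    [parts.headI]
  String.mk pieces.flatten

-- ===== PRECONDITION & SPEC =====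
-- Pre_ excludes interval = 0 with a nonempty tree: there Python A raises ZeroDivisionError
-- (the modulo is evaluated on every character, even when no 'O' occurs).
def Pre_trim_decorations (tree : String) (interval : Int) : Prop :=
  tree = "" ∨ interval ≠ 0
instance (tree : String) (interval : Int) : Decidable (Pre_trim_decorations tree interval) := by
  unfold Pre_trim_decorations; infer_instance

def pvWitness_trim_decorations : String × Int := ("OO*xO", 2)

def Spec_trim_decorations (tree : String) (interval : Int) (out : String) : Prop := out = trim_decorations_alt tree interval
instance (tree : String) (interval : Int) (out : String) : Decidable (Spec_trim_decorations tree interval out) := by unfold Spec_trim_decorations; infer_instance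

-- ===== CLAIM (what is proved, stated in full; the proofs are below) =====
def Claim_equal_trim_decorations : Prop := ∀ (tree : String) (interval : Int), Dom_trim_decorations tree interval → Pre_trim_decorations tree interval → Spec_trim_decorations tree interval (trim_decorations tree interval)

-- ===== LEMMAS AND PROOFS =====

-- the separator B emits for the j-th ornament (1-based)
def pvSep (n : Int) (j : Nat) : Char :=
  if n = 1 ∨ PySem.Int.mod (j : Int) n = 1 then 'O' else '*'

-- B's rejoin of the remaining segments, separator indices j+1, j+2, …
def pvGlueTail (n : Int) (j : Nat) : List (List Char) → List Char
  | [] => []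
  | p :: r => pvSep n (j + 1) :: (p ++ pvGlueTail n (j + 1) r)

-- B's foldl over zipIdx, flattened, is pvGlueTail
theorem fold_eq_glue (n : Int) (rest : List (List Char)) :
    ∀ (k : Nat) (acc : List (List Char)),
      ((rest.zipIdx (k + 1)).foldl
        (fun acc pj =>
          acc ++ [[if n = 1 ∨ PySem.Int.mod (pj.2 : Int) n = 1 then 'O' else '*'], pj.1])
        acc).flatten = acc.flatten ++ pvGlueTail n k rest := by
  induction rest with
  | nil => intro k acc; simp [pvGlueTail]
  | cons p r ih =>
    intro k acc
    have := ih (k + 1) (acc ++ [[if n = 1 ∨ PySem.Int.mod ((k + 1 : Nat) : Int) n = 1 then 'O' else '*'], p])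
    simp only [List.zipIdx_cons, List.foldl_cons] at *
    rw [this]
    simp [pvGlueTail, pvSep]

-- A's loop, started with counter j, equals the head segment followed by the rejoined tail
theorem loopA_eq_split (n : Int) (cs : List Char) :
    ∀ (j : Nat),
      pvLoopA cs (j : Int) n =
        (List.splitOn 'O' cs).headI ++ pvGlueTail n j (List.splitOn 'O' cs).tail := by
  induction cs with
  | nil => intro j; simp [pvLoopA, List.splitOn, List.splitOnP_nil, pvGlueTail]
  | cons c cs ih =>
    intro j
    by_cases hc : c = 'O'
    · subst hc
      have hihj := ih (j + 1)
      have hsplit : List.splitOn 'O' ('O' :: cs) = [] :: List.splitOn 'O' cs := by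
        simp [List.splitOn, List.splitOnP_cons]
      obtain ⟨h, t, hht⟩ : ∃ h t, List.splitOn 'O' cs = h :: t :=
        List.exists_cons_of_ne_nil (List.splitOnP_ne_nil _ cs)
      rw [hsplit, hht]
      rw [hht] at hihj
      push_cast at hihj
      simp only [List.headI, List.tail, pvGlueTail, List.nil_append] at hihj ⊢
      have hsep : (if PySem.Int.mod ((j : Int) + 1) n ≠ 1 ∧ ('O' : Char) = 'O' ∧ n ≠ 1
            then '*' else 'O') = pvSep n (j + 1) := by
        unfold pvSep
        push_cast
        by_cases h1 : n = 1 <;> by_cases h2 : PySem.Int.mod ((j : Int) + 1) n = 1 <;>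
          simp [h1, h2]
      simp only [pvLoopA, if_true, hihj]
      rw [← hsep]
      simp
    · have hihj := ih j
      simp only [pvLoopA, if_neg hc]
      simp only [hc, and_false, false_and, if_false]
      obtain ⟨h, t, hht⟩ := List.exists_cons_of_ne_nil (List.splitOnP_ne_nil (· == 'O') cs)
      simp only [List.splitOn, List.splitOnP_cons] at *
      have hbc : (c == 'O') = false := by simp [hc]
      rw [hbc]
      simp only [if_neg Bool.false_ne_true, hht, List.modifyHead_cons]
      rw [hht] at hihj
      simp only [List.headI, List.tail] at *
      rw [hihj]
      simp

-- ===== VERDICT (by name: the statement is the Claim_ definition above) =====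
theorem trim_decorations_spec : Claim_equal_trim_decorations := by
  intro tree interval _ _
  unfold Spec_trim_decorations trim_decorations trim_decorations_alt
  obtain ⟨h, t, hht⟩ := List.exists_cons_of_ne_nil (List.splitOnP_ne_nil (· == 'O') tree.toList)
  have := loopA_eq_split interval tree.toList 0
  simp only [Nat.cast_zero] at this
  rw [this]
  simp only [List.splitOn] at *
  rw [hht]
  simp only [List.headI, List.tail, List.drop_one]
  rw [fold_eq_glue]
  simp
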